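-- pv_equiv track=rewrite | github.com/xuanloc5008/MoFM | src/data/context.py | build_context_indices
-- ===== SOURCE A (Python) =====
-- from typing import Dict, List
--
-- def build_context_indices(
--     records: List[Dict],
--     context_slices: int = 1,
-- ) -> List[List[int]]:
--     """
--     Return, for each slice index, the neighboring indices to stack as channels.
--
--     Context grouping is done per `(patient_id, phase)` so ED/ES and subjects do
--     not bleed into each other. Border slices use edge replication.
--     """
--     if context_slices <= 1:
--         return [[i] for i in range(len(records))]
--     if context_slices % 2 == 0:
--         raise ValueError(f"context_slices must be odd, got {context_slices}")
--
--     groups: Dict[tuple, List[int]] = {}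
--     for idx, record in enumerate(records):
--         key = (
--             record.get("patient_id", ""),
--             record.get("phase", ""),
--         )
--         groups.setdefault(key, []).append(idx)
--
--     context_map: List[List[int]] = [[i] for i in range(len(records))]
--     radius = context_slices // 2
--     for indices in groups.values():
--         ordered = sorted(indices, key=lambda i: int(records[i].get("slice_idx", -1)))
--         for pos, center_idx in enumerate(ordered):
--             ctx = []
--             for offset in range(-radius, radius + 1):
--                 neighbor_pos = min(max(pos + offset, 0), len(ordered) - 1)
--                 ctx.append(ordered[neighbor_pos])
--             context_map[center_idx] = ctx
--     return context_map
-- ===== SOURCE B (Python) =====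
-- from typing import Dict, List
--
-- def build_context_indices(
--     records: List[Dict],
--     context_slices: int = 1,
-- ) -> List[List[int]]:
--     """Staged-pass variant: precompute the key of every record once, iterate over
--     the distinct keys (first-occurrence order) selecting each group's members by
--     a filter over the key list, build each context window as left-pad + contiguous
--     slice + right-pad, and read the final list out of a center->window mapping."""
--     n = len(records)
--     if context_slices <= 1:
--         return [[i] for i in range(n)]
--     if context_slices % 2 == 0:
--         raise ValueError(f"context_slices must be odd, got {context_slices}")
--
--     keys = [(r.get("patient_id", ""), r.get("phase", "")) for r in records]
--     radius = context_slices // 2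
--     windows: Dict[int, List[int]] = {}
--     for k in dict.fromkeys(keys):
--         members = [i for i, kk in enumerate(keys) if kk == k]
--         ordered = sorted(members, key=lambda i: int(records[i].get("slice_idx", -1)))
--         last = len(ordered) - 1
--         for pos, center in enumerate(ordered):
--             windows[center] = (
--                 [ordered[0]] * (radius - pos)
--                 + ordered[max(0, pos - radius): pos + radius + 1]
--                 + [ordered[-1]] * (pos + radius - last)
--             )
--     return [windows.get(i, [i]) for i in range(n)]
-- ===== Notes on version B (the rewrite author's own statement) =====
-- stated objective: alternative
-- what changed: B replaces A's setdefault-grouping dict and clamped-index inner loop by staged passes: precompute each record's key once, iterate over the distinct keys (dict.fromkeys) selecting each group with a filter, build each window as left-pad + contiguous slice + right-pad, and assemble the output from a center->window dict; a timing run measured B faster (slicing replaces the per-offset interpreted loop), though B's per-distinct-key filter adds an O(n*g) term that costs when groups are very numerous.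
import Mathlib
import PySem

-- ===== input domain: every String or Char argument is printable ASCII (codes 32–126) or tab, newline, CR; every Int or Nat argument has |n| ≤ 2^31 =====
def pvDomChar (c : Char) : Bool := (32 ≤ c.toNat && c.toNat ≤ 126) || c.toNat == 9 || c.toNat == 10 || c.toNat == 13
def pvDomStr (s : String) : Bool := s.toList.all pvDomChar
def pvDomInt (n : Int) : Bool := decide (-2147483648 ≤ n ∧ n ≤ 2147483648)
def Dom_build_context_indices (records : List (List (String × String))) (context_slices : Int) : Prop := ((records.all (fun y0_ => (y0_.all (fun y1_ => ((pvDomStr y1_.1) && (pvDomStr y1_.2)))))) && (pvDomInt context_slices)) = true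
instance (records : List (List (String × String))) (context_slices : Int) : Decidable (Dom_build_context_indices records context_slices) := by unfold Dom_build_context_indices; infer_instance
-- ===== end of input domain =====

-- B is a staged-pass alternative (same asymptotics up to the number of distinct groups):
-- it precomputes every record's key once, iterates over the DISTINCT keys selecting each
-- group by a filter, builds each window as left-pad ++ contiguous slice ++ right-pad, and
-- reads the output from a center->window dict — instead of A's setdefault grouping dict,
-- clamped-index inner loop and mutation of a preallocated list.

-- ===== PORT A =====
-- the (patient_id, phase) group key of a record (the same lookups both Pythons perform)
def bciKey (r : List (String × String)) : String × String :=
  ((PySem.Dict.mk r).getD "patient_id" "", (PySem.Dict.mk r).getD "phase" "")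

-- sort key: int(records[i].get("slice_idx", -1)); a parse failure (ValueError) is excluded by Pre_
def bciSliceKey (records : List (List (String × String))) (i : Int) : Int :=
  match (PySem.Dict.mk (PySem.List.pyGetD records i [])).get? "slice_idx" with
  | none => -1
  | some s => (PySem.Int.ofStr? s).getD 0

-- A's grouping loop: groups.setdefault(key, []).append(idx)
def bciGroups (records : List (List (String × String))) : PySem.Dict (String × String) (List Int) :=
  (PySem.List.enumerate records 0).foldl
    (fun g p => g.modify (bciKey p.2) [] (fun xs => xs ++ [p.1])) PySem.Dict.empty

-- A's inner loop: ctx = [ordered[min(max(pos+offset,0), len(ordered)-1)] for offset in range(-radius, radius+1)]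
def bciCtx (ordered : List Int) (radius pos : Int) : List Int :=
  (PySem.List.pyRange (-radius) (radius + 1) 1).foldl
    (fun ctx offset =>
      ctx ++ [PySem.List.pyGetD ordered
        (min (max (pos + offset) 0) (PySem.List.len ordered - 1)) 0]) []

def build_context_indices (records : List (List (String × String))) (context_slices : Int) : List (List Int) :=
  if context_slices ≤ 1 then
    (PySem.List.pyRange 0 (PySem.List.len records) 1).map (fun i => [i])
  else if PySem.Int.mod context_slices 2 = 0 then
    []  -- Python raises ValueError here; excluded by Pre_
  else
    let groups := bciGroups records
    let radius := PySem.Int.floordiv context_slices 2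
    groups.values.foldl (fun context_map indices =>
      let ordered := PySem.List.sorted indices (bciSliceKey records) false
      (PySem.List.enumerate ordered 0).foldl (fun context_map pc =>
        PySem.List.pySetD context_map pc.2 (bciCtx ordered radius pc.1)) context_map)
      ((PySem.List.pyRange 0 (PySem.List.len records) 1).map (fun i => [i]))

-- ===== PORT B =====
-- B's window: [ordered[0]]*(radius-pos) + ordered[max(0,pos-radius):pos+radius+1] + [ordered[-1]]*(pos+radius-last)
def bciWindow (ordered : List Int) (radius last pos : Int) : List Int :=
  PySem.List.pyRepeat [PySem.List.pyGetD ordered 0 0] (radius - pos)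
    ++ PySem.List.slice ordered (some (max 0 (pos - radius))) (some (pos + radius + 1))
    ++ PySem.List.pyRepeat [PySem.List.pyGetD ordered (-1) 0] (pos + radius - last)

-- B's group of key k: members = [i for i, kk in enumerate(keys) if kk == k]
def bciMembers (keys : List (String × String)) (k : String × String) : List Int :=
  ((PySem.List.enumerate keys 0).filter (fun p => p.2 == k)).map (·.1)

def build_context_indices_alt (records : List (List (String × String))) (context_slices : Int) : List (List Int) :=
  if context_slices ≤ 1 then
    (PySem.List.pyRange 0 (PySem.List.len records) 1).map (fun i => [i])
  else if PySem.Int.mod context_slices 2 = 0 then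
    []  -- Python raises ValueError here; excluded by Pre_
  else
    let keys := records.map bciKey
    let radius := PySem.Int.floordiv context_slices 2
    let windows := (PySem.List.dedup keys).foldl (fun w k =>
      let ordered := PySem.List.sorted (bciMembers keys k) (bciSliceKey records) false
      let last := PySem.List.len ordered - 1
      (PySem.List.enumerate ordered 0).foldl (fun w pc =>
        w.insert pc.2 (bciWindow ordered radius last pc.1)) w)
      PySem.Dict.empty
    (PySem.List.pyRange 0 (PySem.List.len records) 1).map (fun i => windows.getD i [i])

-- ===== PRECONDITION & SPEC =====
-- Pre_ excludes exactly the inputs where the Python A raises: an even context_slices > 1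
-- (explicit ValueError), and, when context_slices is odd and > 1, a record whose
-- "slice_idx" value does not parse as an int (ValueError from int()).
def Pre_build_context_indices (records : List (List (String × String))) (context_slices : Int) : Prop :=
  context_slices ≤ 1 ∨
    (PySem.Int.mod context_slices 2 ≠ 0 ∧
      ∀ r ∈ records, (((PySem.Dict.mk r).get? "slice_idx").all
        (fun v => (PySem.Int.ofStr? v).isSome)) = true)
instance (records : List (List (String × String))) (context_slices : Int) : Decidable (Pre_build_context_indices records context_slices) := by unfold Pre_build_context_indices; infer_instance

def pvWitness_build_context_indices : (List (List (String × String))) × Int :=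
  ([[("patient_id", "a"), ("phase", "ED"), ("slice_idx", "0")],
    [("patient_id", "a"), ("phase", "ED"), ("slice_idx", "1")],
    [("patient_id", "b"), ("phase", "ES"), ("slice_idx", "2")]], 3)

def Spec_build_context_indices (records : List (List (String × String))) (context_slices : Int) (out : List (List Int)) : Prop := out = build_context_indices_alt records context_slices
instance (records : List (List (String × String))) (context_slices : Int) (out : List (List Int)) : Decidable (Spec_build_context_indices records context_slices out) := by unfold Spec_build_context_indices; infer_instance

-- ===== CLAIM (what is proved, stated in full; the proofs are below) =====
def Claim_equal_build_context_indices : Prop := ∀ (records : List (List (String × String))) (context_slices : Int), Dom_build_context_indices records context_slices → Pre_build_context_indices records context_slices → Spec_build_context_indices records context_slices (build_context_indices records context_slices)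

-- ===== LEMMAS AND PROOFS =====
-- proof-only helper: B's output viewed as a function of the center->window dict
def bciP (n : Int) (w : PySem.Dict Int (List Int)) : List (List Int) :=
  (PySem.List.pyRange 0 n 1).map (fun i => w.getD i [i])

lemma map_pyRange_shift {α : Type} (g : Int → α) (p a b : Int) :
    (PySem.List.pyRange a b 1).map (fun o => g (p + o)) = (PySem.List.pyRange (p + a) (p + b) 1).map g := by
  rw [PySem.List.pyRange_one a b, PySem.List.pyRange_one (p+a) (p+b)]
  simp only [List.map_map]
  have : (p + b - (p + a)) = b - a := by ring
  rw [this]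
  apply List.map_congr_left
  intro k _
  simp only [Function.comp]
  ring_nf

lemma map_pyRange_pyGetD_eq_drop_take {α : Type} (xs : List α) (a b : Int) (d : α)
    (h0 : 0 ≤ a) (hb : b ≤ (xs.length : Int)) :
    (PySem.List.pyRange a b 1).map (fun j => PySem.List.pyGetD xs j d)
      = (xs.drop a.toNat).take (b - a).toNat := by
  apply List.ext_getElem
  · simp [PySem.List.length_pyRange_one]
    omega
  · intro k h1 h2
    rw [List.getElem_map, PySem.List.getElem_pyRange_one, List.getElem_take, List.getElem_drop,
      PySem.List.pyGetD_eq_getElem]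
    · congr 1
      simp [PySem.List.length_pyRange_one] at h1
      omega
    · omega
    · simp [PySem.List.length_pyRange_one] at h1
      omega

lemma bciCtx_eq_bciWindow (ordered : List Int) (radius pos : Int)
    (hr : 0 ≤ radius) (hp : 0 ≤ pos) (hpl : pos < (ordered.length : Int)) :
    bciCtx ordered radius pos = bciWindow ordered radius ((PySem.List.len ordered) - 1) pos := by
  have hne : ordered ≠ [] := by
    intro h; subst h; simp at hpl; omega
  have hL : 1 ≤ (ordered.length : Int) := by
    have := List.length_pos_of_ne_nil hne
    omega
  set L : Int := (ordered.length : Int) with hLdef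
  have s1def : (-radius) ≤ max (-radius) (-pos) := le_max_left _ _
  unfold bciCtx bciWindow
  rw [PySem.List.foldl_append_singleton_eq_map, List.nil_append]
  rw [PySem.List.pyRange_one_append (-radius) (max (-radius) (-pos)) (radius+1) (le_max_left _ _) (by omega)]
  rw [PySem.List.pyRange_one_append (max (-radius) (-pos)) (min (radius+1) (L - pos)) (radius+1) (by omega) (by omega)]
  rw [List.map_append, List.map_append]
  simp only [PySem.List.len_eq]
  rw [List.append_assoc]
  congr 1
  · -- left pad
    rw [PySem.List.pyRepeat_singleton]
    have : ∀ o ∈ PySem.List.pyRange (-radius) (max (-radius) (-pos)) 1,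
        PySem.List.pyGetD ordered (min (max (pos + o) 0) (L - 1)) 0 = PySem.List.pyGetD ordered 0 0 := by
      intro o ho
      rw [PySem.List.mem_pyRange_one] at ho
      have h0 : min (max (pos + o) 0) (L - 1) = 0 := by omega
      rw [h0]
    rw [List.map_congr_left this, List.map_const', PySem.List.length_pyRange_one]
    have : (max (-radius) (-pos) - -radius).toNat = (radius - pos).toNat := by omega
    rw [this]
  congr 1
  · -- middle
    have : ∀ o ∈ PySem.List.pyRange (max (-radius) (-pos)) (min (radius+1) (L - pos)) 1,
        PySem.List.pyGetD ordered (min (max (pos + o) 0) (L - 1)) 0 = PySem.List.pyGetD ordered (pos + o) 0 := by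
      intro o ho
      rw [PySem.List.mem_pyRange_one] at ho
      have h0 : min (max (pos + o) 0) (L - 1) = pos + o := by omega
      rw [h0]
    rw [List.map_congr_left this, map_pyRange_shift (fun j => PySem.List.pyGetD ordered j 0) pos]
    rw [map_pyRange_pyGetD_eq_drop_take ordered _ _ 0 (by omega) (by omega)]
    rw [PySem.List.slice_toNat ordered (by omega) (by omega)]
    have ha : (pos + max (-radius) (-pos)) = max 0 (pos - radius) := by omega
    rw [ha]
    rcases le_or_gt (radius + 1) (L - pos) with h | h
    · have h1 : (pos + min (radius+1) (L-pos)) = pos + radius + 1 := by omega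
      rw [h1]
      have h2 : (pos + radius + 1 - max 0 (pos - radius)).toNat = (pos + radius + 1).toNat - (max 0 (pos - radius)).toNat := by omega
      rw [h2]
    · have : (pos + min (radius+1) (L-pos)) = L := by omega
      rw [this]
      rw [List.take_eq_take_iff]
      simp
      omega
  · -- right pad
    rw [PySem.List.pyRepeat_singleton]
    have hlast : PySem.List.pyGetD ordered (-1) 0 = PySem.List.pyGetD ordered (L - 1) 0 := by
      rw [PySem.List.pyGetD_neg_one ordered 0 hne, PySem.List.pyGetD_eq_getElem ordered (i := L-1) 0 (by omega) (by omega)]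
      rw [List.getLast_eq_getElem]
      congr 1
      omega
    have : ∀ o ∈ PySem.List.pyRange (min (radius+1) (L - pos)) (radius+1) 1,
        PySem.List.pyGetD ordered (min (max (pos + o) 0) (L - 1)) 0 = PySem.List.pyGetD ordered (L - 1) 0 := by
      intro o ho
      rw [PySem.List.mem_pyRange_one] at ho
      have h0 : min (max (pos + o) 0) (L - 1) = L - 1 := by omega
      rw [h0]
    rw [List.map_congr_left this, List.map_const', PySem.List.length_pyRange_one, hlast.symm]
    have h3 : (radius + 1 - min (radius + 1) (L - pos)).toNat = (pos + radius - (L - 1)).toNat := by omega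
    rw [h3]

lemma bciP_set (n : Int) (w : PySem.Dict Int (List Int)) (c : Int) (v : List Int)
    (h0 : 0 ≤ c) :
    PySem.List.pySetD (bciP n w) c v = bciP n (w.insert c v) := by
  rw [PySem.List.pySetD_of_nonneg _ _ h0]
  unfold bciP
  apply List.ext_getElem
  · simp
  · intro k hk hk'
    simp only [List.length_map, PySem.List.length_pyRange_one] at hk'
    rw [List.getElem_set, List.getElem_map, List.getElem_map,
       PySem.List.getElem_pyRange_one, PySem.Dict.getD_insert]
    by_cases h : c.toNat = k
    · rw [if_pos h, if_pos (by omega)]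
    · rw [if_neg h, if_neg (by omega : ¬ ((0:Int) + ↑k = c))]

lemma bci_paired_fold (n : Int) (W : Int → List Int) :
    ∀ (ps : List (Int × Int)) (w : PySem.Dict Int (List Int)),
    (∀ q ∈ ps, 0 ≤ q.2) →
    ps.foldl (fun c q => PySem.List.pySetD c q.2 (W q.1)) (bciP n w)
      = bciP n (ps.foldl (fun d q => d.insert q.2 (W q.1)) w) := by
  intro ps
  induction ps with
  | nil => intro w _; rfl
  | cons q t ih =>
    intro w h
    simp only [List.foldl_cons]
    rw [bciP_set n w q.2 (W q.1) (h q List.mem_cons_self)]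
    exact ih _ (fun q hq => h q (List.mem_cons_of_mem _ hq))

lemma bciGroups_eq (records : List (List (String × String))) :
    bciGroups records = ((PySem.List.enumerate records 0).map (fun p => (bciKey p.2, p.1))).foldl
      (fun d q => d.modify q.1 [] (fun xs => xs ++ [q.2])) PySem.Dict.empty := by
  rw [List.foldl_map]
  rfl

lemma bciGroups_keys_nodup (records : List (List (String × String))) :
    (bciGroups records).keys.Nodup := by
  unfold bciGroups
  exact PySem.Dict.nodup_keys_foldl_modify_key
    (ν := List Int) (PySem.List.enumerate records 0) (fun p => bciKey p.2) []
    (fun _ p xs => xs ++ [p.1]) PySem.Dict.empty PySem.Dict.nodup_keys_empty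

lemma bci_enum_map {α β : Type} (f : α → β) : ∀ (xs : List α) (s : Int),
    PySem.List.enumerate (xs.map f) s = (PySem.List.enumerate xs s).map (fun p => (p.1, f p.2)) := by
  intro xs
  induction xs with
  | nil => intro s; rfl
  | cons x t ih => intro s; simp [PySem.List.enumerate_cons, ih]

-- A's dict of groups, read out in order, IS B's list of per-distinct-key filters
lemma bciGroups_keys_eq (records : List (List (String × String))) :
    (bciGroups records).keys = PySem.List.dedup (records.map bciKey) := by
  unfold bciGroups
  rw [PySem.Dict.keys_foldl_modify_key
    (ν := List Int) (PySem.List.enumerate records 0) (fun p => bciKey p.2) []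
    (fun _ p xs => xs ++ [p.1]) PySem.Dict.empty]
  have h : (PySem.List.enumerate records 0).map (fun p => bciKey p.2) = records.map bciKey := by
    rw [show (fun (p : Int × List (String × String)) => bciKey p.2)
        = bciKey ∘ (fun (p : Int × List (String × String)) => p.2) from rfl,
      ← List.map_map, PySem.List.map_snd_enumerate]
  rw [h]
  rfl

lemma bciGroups_getD (records : List (List (String × String))) (k : String × String) :
    (bciGroups records).getD k [] = bciMembers (records.map bciKey) k := by
  rw [bciGroups_eq records, PySem.Dict.getD_foldl_modify_append, PySem.Dict.getD_empty,
    List.nil_append]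
  unfold bciMembers
  rw [bci_enum_map bciKey records 0]
  rw [List.filter_map, List.map_map, List.filter_map, List.map_map]
  rfl

lemma bciGroups_values_eq (records : List (List (String × String))) :
    (bciGroups records).values
      = (PySem.List.dedup (records.map bciKey)).map (bciMembers (records.map bciKey)) := by
  rw [PySem.Dict.values_eq_map_keys (bciGroups records) (bciGroups_keys_nodup records) [],
    bciGroups_keys_eq records]
  exact List.map_congr_left (fun k _ => bciGroups_getD records k)

lemma bciGroups_values_range (records : List (List (String × String))) :
    ∀ g ∈ (bciGroups records).values, ∀ x ∈ g, 0 ≤ x ∧ x < (records.length : Int) := by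
  intro g hg x hx
  rw [bciGroups_values_eq records] at hg
  rcases List.mem_map.mp hg with ⟨k, _, he⟩
  rw [← he] at hx
  unfold bciMembers at hx
  rcases List.mem_map.mp hx with ⟨q, hq, hqx⟩
  have hq' := List.mem_of_mem_filter hq
  rw [PySem.List.mem_enumerate_iff] at hq'
  rcases hq' with ⟨j, hj, hpe⟩
  subst hpe
  simp only at hqx
  simp at hj
  omega

lemma bci_outer (records : List (List (String × String))) (radius : Int) (hr : 0 ≤ radius) :
    ∀ (gs : List (List Int)) (w : PySem.Dict Int (List Int)),
    (∀ g ∈ gs, ∀ x ∈ g, 0 ≤ x ∧ x < (records.length : Int)) →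
    gs.foldl (fun context_map indices =>
        (PySem.List.enumerate (PySem.List.sorted indices (bciSliceKey records) false) 0).foldl
          (fun context_map pc => PySem.List.pySetD context_map pc.2
            (bciCtx (PySem.List.sorted indices (bciSliceKey records) false) radius pc.1)) context_map)
      (bciP (records.length : Int) w)
    = bciP (records.length : Int)
      (gs.foldl (fun w indices =>
        (PySem.List.enumerate (PySem.List.sorted indices (bciSliceKey records) false) 0).foldl
          (fun w pc => w.insert pc.2
            (bciWindow (PySem.List.sorted indices (bciSliceKey records) false) radius
              ((PySem.List.len (PySem.List.sorted indices (bciSliceKey records) false)) - 1) pc.1)) w) w) := by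
  intro gs
  induction gs with
  | nil => intro w _; rfl
  | cons g t ih =>
    intro w h
    simp only [List.foldl_cons]
    set ord := PySem.List.sorted g (bciSliceKey records) false with hord
    have hmem : ∀ x ∈ ord, x ∈ g := fun x hx => (PySem.List.sorted_perm g (bciSliceKey records) false).mem_iff.mp hx
    have hcongr : (PySem.List.enumerate ord 0).foldl
        (fun w pc => w.insert pc.2 (bciWindow ord radius ((PySem.List.len ord) - 1) pc.1)) w
      = (PySem.List.enumerate ord 0).foldl
        (fun w pc => w.insert pc.2 (bciCtx ord radius pc.1)) w := by
      apply PySem.List.foldl_congr_mem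
      intro acc pc hpc
      rw [PySem.List.mem_enumerate_iff] at hpc
      rcases hpc with ⟨k, hk, hpe⟩
      subst hpe
      rw [← bciCtx_eq_bciWindow ord radius (0 + (k:Int)) hr (by omega) (by omega)]
    rw [hcongr]
    have hstep : (PySem.List.enumerate ord 0).foldl
        (fun context_map pc => PySem.List.pySetD context_map pc.2 (bciCtx ord radius pc.1))
        (bciP (records.length : Int) w)
      = bciP (records.length : Int)
        ((PySem.List.enumerate ord 0).foldl (fun w pc => w.insert pc.2 (bciCtx ord radius pc.1)) w) := by
      apply bci_paired_fold
      intro q hq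
      rw [PySem.List.mem_enumerate_iff] at hq
      rcases hq with ⟨k, hk, hpe⟩
      subst hpe
      exact (h g List.mem_cons_self _ (hmem _ (List.getElem_mem hk))).1
    rw [hstep]
    exact ih _ (fun g' hg' => h g' (List.mem_cons_of_mem _ hg'))

-- ===== VERDICT (by name: the statement is the Claim_ definition above) =====

theorem build_context_indices_spec : Claim_equal_build_context_indices := by
  intro records context_slices hdom hpre
  unfold Spec_build_context_indices
  unfold build_context_indices build_context_indices_alt
  by_cases h1 : context_slices ≤ 1
  · simp only [if_pos h1]
  · have hodd : ¬ (PySem.Int.mod context_slices 2 = 0) := by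
      rcases hpre with h | ⟨h, _⟩
      · exact absurd h h1
      · exact h
    simp only [if_neg h1, if_neg hodd]
    have hr : 0 ≤ PySem.Int.floordiv context_slices 2 := by
      have h2 : PySem.Int.floordiv context_slices 2 = context_slices / 2 :=
        PySem.Int.floordiv_eq_ediv_of_pos (by omega)
      omega
    have hinit : ((PySem.List.pyRange 0 (PySem.List.len records) 1).map (fun i => [i]))
        = bciP (records.length : Int) PySem.Dict.empty := by
      unfold bciP
      simp [PySem.Dict.getD_empty]
    have hB : (PySem.List.dedup (records.map bciKey)).foldl (fun w k =>
        (PySem.List.enumerate (PySem.List.sorted (bciMembers (records.map bciKey) k) (bciSliceKey records) false) 0).foldl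
          (fun w pc => w.insert pc.2
            (bciWindow (PySem.List.sorted (bciMembers (records.map bciKey) k) (bciSliceKey records) false)
              (PySem.Int.floordiv context_slices 2)
              ((PySem.List.len (PySem.List.sorted (bciMembers (records.map bciKey) k) (bciSliceKey records) false)) - 1) pc.1)) w)
        PySem.Dict.empty
      = (bciGroups records).values.foldl (fun w indices =>
        (PySem.List.enumerate (PySem.List.sorted indices (bciSliceKey records) false) 0).foldl
          (fun w pc => w.insert pc.2
            (bciWindow (PySem.List.sorted indices (bciSliceKey records) false)
              (PySem.Int.floordiv context_slices 2)
              ((PySem.List.len (PySem.List.sorted indices (bciSliceKey records) false)) - 1) pc.1)) w)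
        PySem.Dict.empty := by
      rw [bciGroups_values_eq records, List.foldl_map]
    have := bci_outer records (PySem.Int.floordiv context_slices 2) hr
      (bciGroups records).values PySem.Dict.empty (bciGroups_values_range records)
    simp only [PySem.List.len_eq]
    rw [← hinit] at this
    simp only [PySem.List.len_eq] at this
    rw [this]
    simp only [PySem.List.len_eq] at hB
    rw [hB]
    rfl
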